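-- pv_equiv track=rewrite | github.com/lsk74669/Coding_Test | 프로그래머스/2/42586. 기능개발/기능개발.py | solution
-- ===== SOURCE A (Python) =====
-- def solution(progresses, speeds):
--     import math
--     answer = []
--     days_left = [math.ceil((100 - prog) / speed) for prog, speed in zip(progresses, speeds)]
--
--     curr = days_left[0]
--     count = 1
--
--     for i in range(1, len(days_left)):
--         if days_left[i] <= curr:
--             count += 1
--         else:
--             answer.append(count)
--             curr = days_left[i]
--             count = 1
--
--     answer.append(count)
--
--     return answer
-- ===== SOURCE B (Python) =====
-- def solution(progresses, speeds):
--     # exact integer ceil-division (equals A's float math.ceil on |ints| <= 2^31)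
--     days = [-(-(100 - p) // s) for p, s in zip(progresses, speeds)]
--     # pass 1: prefix-maximum table (seeded with days[0]; raises IndexError on empty like A)
--     m = days[0]
--     running = []
--     for d in days:
--         m = max(m, d)
--         running.append(m)
--     # pass 2: run-length encode consecutive equal prefix-max values
--     answer = []
--     run_val, run_len = running[0], 0
--     for v in running:
--         if v == run_val:
--             run_len += 1
--         else:
--             answer.append(run_len)
--             run_val, run_len = v, 1
--     answer.append(run_len)
--     return answer
-- ===== Notes on version B (the rewrite author's own statement) =====
-- stated objective: alternative
-- what changed: B replaces A's single fused accumulator sweep with a two-pass decomposition: build a prefix-maximum table of the days-left values, then run-length-encode its consecutive equal runs; it also computes the ceiling by exact integer floor-division instead of float division plus math.ceil.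
-- outside the precondition, e.g. on solution([], []): A raises IndexError, B raises IndexError; on solution([50], [0]): A raises ZeroDivisionError, B raises ZeroDivisionError
import Mathlib
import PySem

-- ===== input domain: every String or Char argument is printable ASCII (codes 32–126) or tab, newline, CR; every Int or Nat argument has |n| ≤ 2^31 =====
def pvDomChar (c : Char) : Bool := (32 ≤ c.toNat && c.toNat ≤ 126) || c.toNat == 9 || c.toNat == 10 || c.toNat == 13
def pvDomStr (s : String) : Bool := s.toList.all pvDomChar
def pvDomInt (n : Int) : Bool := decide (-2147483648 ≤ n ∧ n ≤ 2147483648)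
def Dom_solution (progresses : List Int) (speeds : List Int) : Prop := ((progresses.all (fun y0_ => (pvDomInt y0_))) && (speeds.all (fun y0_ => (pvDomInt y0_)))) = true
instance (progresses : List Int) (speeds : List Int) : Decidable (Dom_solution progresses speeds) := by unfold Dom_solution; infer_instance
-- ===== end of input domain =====

-- B restructures A as prefix-max table + run-length encoding (alternative decomposition);
-- return-value equivalence on Pre_ (nonempty zipped input, no zero speed among the used speeds).

-- math.ceil((100-p)/s): exact since |100-p|,|s| ≤ 2^31+100 < 2^53, so the float
-- quotient's rounding error cannot cross an integer; ported as exact integer ceil.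
def pvCeilDiv (a : Int) (b : Int) : Int := -(PySem.Int.floordiv (-a) b)

-- ===== PORT A =====
-- A's for-loop over days_left[1:] with state (answer, curr, count)
def solutionLoopA : List Int → List Int → Int → Int → List Int
  | ans, [], _, count => ans ++ [count]
  | ans, d :: ds, curr, count =>
      if d ≤ curr then solutionLoopA ans ds curr (count + 1)
      else solutionLoopA (ans ++ [count]) ds d 1

def solution (progresses : List Int) (speeds : List Int) : List Int :=
  let days := (List.zip progresses speeds).map (fun ps => pvCeilDiv (100 - ps.1) ps.2)
  match days with
  | [] => []  -- unreachable under Pre_ (Python raises IndexError on days_left[0])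
  | d0 :: rest => solutionLoopA [] rest d0 1

-- ===== PORT B =====
-- pass 1: running = prefix maxima of days, seeded with m = days[0]
def prefixMax (m : Int) : List Int → List Int
  | [] => []
  | d :: ds => (max m d) :: prefixMax (max m d) ds

-- pass 2: run-length encode, state (answer, run_val, run_len)
def rleLoop : List Int → Int → Int → List Int → List Int
  | ans, _, n, [] => ans ++ [n]
  | ans, v, n, x :: xs =>
      if x = v then rleLoop ans v (n + 1) xs
      else rleLoop (ans ++ [n]) x 1 xs

def solution_alt (progresses : List Int) (speeds : List Int) : List Int :=
  let days := (List.zip progresses speeds).map (fun ps => pvCeilDiv (100 - ps.1) ps.2)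
  match days with
  | [] => []  -- unreachable under Pre_ (Python raises IndexError)
  | d0 :: _ =>
      let running := prefixMax d0 days
      match running with
      | [] => []
      | r0 :: _ => rleLoop [] r0 0 running

-- ===== PRECONDITION & SPEC =====
-- Pre_ excludes exactly the inputs where Python A raises: an empty zip (IndexError on
-- days_left[0]) or a zero speed among the zipped pairs (ZeroDivisionError).
def Pre_solution (progresses : List Int) (speeds : List Int) : Prop :=
  progresses ≠ [] ∧ speeds ≠ [] ∧ ∀ s ∈ speeds.take progresses.length, s ≠ 0
instance (progresses : List Int) (speeds : List Int) : Decidable (Pre_solution progresses speeds) := by unfold Pre_solution; infer_instance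

def pvWitness_solution : List Int × List Int := ([93, 30, 55], [1, 30, 5])

def Spec_solution (progresses : List Int) (speeds : List Int) (out : List Int) : Prop := out = solution_alt progresses speeds
instance (progresses : List Int) (speeds : List Int) (out : List Int) : Decidable (Spec_solution progresses speeds out) := by unfold Spec_solution; infer_instance

-- ===== CLAIM (what is proved, stated in full; the proofs are below) =====
def Claim_equal_solution : Prop := ∀ (progresses : List Int) (speeds : List Int), Dom_solution progresses speeds → Pre_solution progresses speeds → Spec_solution progresses speeds (solution progresses speeds)

-- ===== LEMMAS AND PROOFS =====

-- A's fused sweep equals run-length encoding of the prefix maxima: curr IS the running max.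
theorem loopA_eq_rle (ds : List Int) : ∀ (ans : List Int) (curr count : Int),
    solutionLoopA ans ds curr count = rleLoop ans curr count (prefixMax curr ds) := by
  induction ds with
  | nil => intro ans curr count; rfl
  | cons d ds ih =>
      intro ans curr count
      by_cases h : d ≤ curr
      · have hm : max curr d = curr := max_eq_left h
        simp [solutionLoopA, prefixMax, rleLoop, h, ih]
      · have hlt : curr < d := lt_of_not_ge h
        have hm : max curr d = d := max_eq_right (le_of_lt hlt)
        have hne : d ≠ curr := ne_of_gt hlt
        simp [solutionLoopA, prefixMax, rleLoop, h, hm, hne, ih]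

-- ===== VERDICT (by name: the statement is the Claim_ definition above) =====
theorem solution_spec : Claim_equal_solution := by
  intro progresses speeds _ hpre
  unfold Spec_solution solution solution_alt
  obtain ⟨hp, hs, _⟩ := hpre
  have hz : List.zip progresses speeds ≠ [] := by
    cases progresses with
    | nil => exact absurd rfl hp
    | cons p ps =>
      cases speeds with
      | nil => exact absurd rfl hs
      | cons q qs => simp [List.zip]
  cases hd : (List.zip progresses speeds).map (fun ps => pvCeilDiv (100 - ps.1) ps.2) with
  | nil => exact absurd (List.map_eq_nil_iff.mp hd) hz
  | cons d0 rest =>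
      simp only [prefixMax, max_self, rleLoop]
      exact loopA_eq_rle rest [] d0 1
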